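-- pv_equiv track=rewrite | github.com/KenMercusLai/checkio | checkio/Storage/Keywords Finder/keywords_finder.py | get_matched_positions
-- ===== SOURCE A (Python) =====
-- def get_matched_positions(text, keywords):
--     results = []
--     for i in keywords:
--         if i:
--             index = 0
--             while index < len(text):
--                 index = text.find(i, index)
--                 if index == -1:
--                     break
--                 results.append((index, index + len(i)))
--                 index += len(i)
--     return results
-- ===== SOURCE B (Python) =====
-- def get_matched_positions(text, keywords):
--     results = []
--     for kw in keywords:
--         if kw:
--             k = len(kw)
--             pos = 0
--             # str.split makes exactly the non-overlapping left-to-right matches;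
--             # the pieces' lengths recover the match positions.
--             for part in text.split(kw)[:-1]:
--                 start = pos + len(part)
--                 results.append((start, start + k))
--                 pos = start + k
--     return results
-- ===== Notes on version B (the rewrite author's own statement) =====
-- stated objective: alternative
-- what changed: A repeatedly calls str.find and advances past each hit; B instead calls text.split(kw) once per keyword and reconstructs the non-overlapping match spans from the cumulative lengths of the split pieces.
import Mathlib
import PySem

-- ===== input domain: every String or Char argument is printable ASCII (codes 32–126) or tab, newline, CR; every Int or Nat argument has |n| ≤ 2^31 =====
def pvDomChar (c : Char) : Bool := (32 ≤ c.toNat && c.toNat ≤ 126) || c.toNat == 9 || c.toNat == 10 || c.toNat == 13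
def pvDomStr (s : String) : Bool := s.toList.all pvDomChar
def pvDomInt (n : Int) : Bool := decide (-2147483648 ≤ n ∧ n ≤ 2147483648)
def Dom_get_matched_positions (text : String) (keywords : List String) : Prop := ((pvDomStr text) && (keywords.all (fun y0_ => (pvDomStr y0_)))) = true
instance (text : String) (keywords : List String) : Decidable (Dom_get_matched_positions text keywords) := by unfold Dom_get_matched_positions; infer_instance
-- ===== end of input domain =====

-- B replaces A's repeated str.find/advance loop by one text.split(kw) per keyword and
-- recovers the match spans from the pieces' lengths (a different algorithm via splitting).

-- ===== PORT A =====
-- A's inner while loop: index = text.find(i, index); append; index += len(i).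
-- fuel = len(text)+1 is always enough: the index strictly increases each iteration.
def pvFindLoopA (t kw : List Char) (res : List (Int × Int)) (index : Nat) : Nat → List (Int × Int)
  | 0 => res
  | fuel + 1 =>
    if index < t.length then
      let f := PySem.Chars.findFrom t kw (index : Int) none
      if f = -1 then res
      else pvFindLoopA t kw (res ++ [(f, f + (kw.length : Int))]) (f.toNat + kw.length) fuel
    else res

def get_matched_positions (text : String) (keywords : List String) : List (Int × Int) :=
  keywords.foldl (fun res kw =>
    if kw.toList.length ≠ 0 then
      pvFindLoopA text.toList kw.toList res 0 (text.toList.length + 1)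
    else res) []

-- ===== PORT B =====
-- B's inner for loop: for part in text.split(kw)[:-1]: start = pos + len(part); append; pos = start + k.
def pvSplitFoldB (k : Nat) (parts : List (List Char)) (res : List (Int × Int)) (pos : Nat) : List (Int × Int) :=
  match parts with
  | [] => res
  | part :: ps =>
    pvSplitFoldB k ps (res ++ [(((pos + part.length : Nat) : Int), ((pos + part.length + k : Nat) : Int))])
      (pos + part.length + k)

def get_matched_positions_alt (text : String) (keywords : List String) : List (Int × Int) :=
  keywords.foldl (fun res kw =>
    if kw.toList.length ≠ 0 then
      pvSplitFoldB kw.toList.length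
        (PySem.List.slice (PySem.Chars.splitOn text.toList kw.toList) none (some (-1))) res 0
    else res) []

-- ===== PRECONDITION & SPEC =====
def Spec_get_matched_positions (text : String) (keywords : List String) (out : List (Int × Int)) : Prop := out = get_matched_positions_alt text keywords
instance (text : String) (keywords : List String) (out : List (Int × Int)) : Decidable (Spec_get_matched_positions text keywords out) := by unfold Spec_get_matched_positions; infer_instance

-- ===== CLAIM (what is proved, stated in full; the proofs are below) =====
def Claim_equal_get_matched_positions : Prop := ∀ (text : String) (keywords : List String), Dom_get_matched_positions text keywords → Spec_get_matched_positions text keywords (get_matched_positions text keywords)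

-- ===== LEMMAS AND PROOFS =====

-- Canonical greedy non-overlapping match list for a non-empty keyword c :: rest, from position pos.
def pvSpecScan (t : List Char) (c : Char) (rest : List Char) (pos : Nat) : List (Int × Int) :=
  if h : pos + (c :: rest).length ≤ t.length then
    if (c :: rest) <+: t.drop pos then
      ((pos : Int), (pos : Int) + ((c :: rest).length : Int)) :: pvSpecScan t c rest (pos + (c :: rest).length)
    else pvSpecScan t c rest (pos + 1)
  else []
termination_by t.length - pos
decreasing_by
  all_goals simp_all; omega

lemma pvSpecScan_nil (t : List Char) (c : Char) (rest : List Char) (pos : Nat)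
    (h : ∀ i, pos ≤ i → ¬ (c :: rest) <+: t.drop i) : pvSpecScan t c rest pos = [] := by
  rw [pvSpecScan]
  split
  · rw [if_neg (h pos le_rfl)]
    exact pvSpecScan_nil t c rest (pos + 1) (fun i hi => h i (by omega))
  · rfl
termination_by t.length - pos
decreasing_by simp_all; omega

lemma pvSpecScan_skip (t : List Char) (c : Char) (rest : List Char) :
    ∀ d pos q, q - pos = d → pos ≤ q → (c :: rest) <+: t.drop q →
    (∀ i, pos ≤ i → i < q → ¬ (c :: rest) <+: t.drop i) →
    pvSpecScan t c rest pos =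
      ((q : Int), (q : Int) + ((c :: rest).length : Int)) :: pvSpecScan t c rest (q + (c :: rest).length) := by
  intro d
  induction d with
  | zero =>
    intro pos q hd hle hpre _
    have hpq : pos = q := by omega
    subst hpq
    have hlen : (c :: rest).length ≤ (t.drop pos).length := hpre.length_le
    rw [List.length_drop] at hlen
    have hq : pos ≤ t.length := by
      by_contra hc
      rw [List.drop_eq_nil_of_le (by omega : t.length ≤ pos)] at hpre
      exact (List.cons_ne_nil c rest) (List.eq_nil_of_prefix_nil hpre)
    rw [pvSpecScan, dif_pos (by omega), if_pos hpre]
  | succ d ih =>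
    intro pos q hd hle hpre hmin
    have hlen : (c :: rest).length ≤ (t.drop q).length := hpre.length_le
    rw [List.length_drop] at hlen
    have hq : q ≤ t.length := by
      by_contra hc
      rw [List.drop_eq_nil_of_le (by omega : t.length ≤ q)] at hpre
      exact (List.cons_ne_nil c rest) (List.eq_nil_of_prefix_nil hpre)
    rw [pvSpecScan, dif_pos (by simp at hlen ⊢; omega),
      if_neg (hmin pos le_rfl (by omega))]
    exact ih (pos + 1) q (by omega) (by omega) hpre (fun i hi h2 => hmin i (by omega) h2)

lemma pvSpecScan_step (t : List Char) (c : Char) (rest : List Char) (pos : Nat)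
    (h : ¬ (c :: rest) <+: t.drop pos) :
    pvSpecScan t c rest pos = pvSpecScan t c rest (pos + 1) := by
  by_cases hg : pos + (c :: rest).length ≤ t.length
  · rw [pvSpecScan, dif_pos hg, if_neg h]
  · rw [pvSpecScan, dif_neg hg, pvSpecScan,
      dif_neg (by simp only [List.length_cons] at hg ⊢; omega)]

lemma pvGo_acc (sep : List Char) :
    ∀ fuel (l cur : List Char) (acc : List (List Char)),
      PySem.Chars.splitOn.go sep fuel l cur acc =
        acc.reverse ++ PySem.Chars.splitOn.go sep fuel l cur [] := by
  intro fuel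
  induction fuel with
  | zero => intro l cur acc; rw [PySem.Chars.splitOn.go.eq_def, PySem.Chars.splitOn.go.eq_def]; simp
  | succ fuel ih =>
    intro l cur acc
    cases l with
    | nil => rw [PySem.Chars.splitOn.go.eq_def, PySem.Chars.splitOn.go.eq_def]; simp
    | cons ch l' =>
      rw [PySem.Chars.splitOn.go.eq_def]
      conv_rhs => rw [PySem.Chars.splitOn.go.eq_def]
      by_cases hp : sep.isPrefixOf (ch :: l') = true
      · simp only [hp, if_true]
        rw [ih _ _ (cur.reverse :: acc), ih _ _ [cur.reverse]]
        simp
      · simp only [hp]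
        exact ih _ _ acc

lemma pvGo_ne_nil (sep : List Char) :
    ∀ fuel (l cur : List Char), PySem.Chars.splitOn.go sep fuel l cur [] ≠ [] := by
  intro fuel
  induction fuel with
  | zero => intro l cur; rw [PySem.Chars.splitOn.go.eq_def]; simp
  | succ fuel ih =>
    intro l cur
    cases l with
    | nil => rw [PySem.Chars.splitOn.go.eq_def]; simp
    | cons ch l' =>
      rw [PySem.Chars.splitOn.go.eq_def]
      by_cases hp : sep.isPrefixOf (ch :: l') = true
      · simp only [hp, if_true]
        rw [pvGo_acc]
        simp
      · simp only [hp]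
        exact ih _ _

lemma pvGo_fold (t : List Char) (c : Char) (rest : List Char) :
    ∀ fuel (cur : List Char) (pos : Nat) (res : List (Int × Int)),
      t.length - (pos + cur.length) < fuel → pos + cur.length ≤ t.length →
      pvSplitFoldB (c :: rest).length
        ((PySem.Chars.splitOn.go (c :: rest) fuel (t.drop (pos + cur.length)) cur []).dropLast) res pos
      = res ++ pvSpecScan t c rest (pos + cur.length) := by
  intro fuel
  induction fuel with
  | zero => intro cur pos res h _; omega
  | succ fuel ih =>
    intro cur pos res hfuel hle
    cases hl : t.drop (pos + cur.length) with
    | nil =>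
      rw [PySem.Chars.splitOn.go.eq_def]
      have hgez : t.length ≤ pos + cur.length := by
        by_contra hc
        have := List.length_drop (l := t) (i := pos + cur.length)
        rw [hl] at this
        simp at this
        omega
      have heq : pos + cur.length = t.length := by omega
      rw [heq, pvSpecScan, dif_neg (by simp only [List.length_cons]; omega)]
      simp [pvSplitFoldB]
    | cons ch l' =>
      rw [PySem.Chars.splitOn.go.eq_def]
      by_cases hp : (c :: rest).isPrefixOf (ch :: l') = true
      · simp only [hp, if_true]
        rw [pvGo_acc]
        have hpre : (c :: rest) <+: t.drop (pos + cur.length) := by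
          rw [hl]; exact List.isPrefixOf_iff_prefix.mp hp
        have hlen : (c :: rest).length ≤ (t.drop (pos + cur.length)).length := hpre.length_le
        rw [List.length_drop] at hlen
        have hdd : List.drop (c :: rest).length (ch :: l') = t.drop (pos + cur.length + (c :: rest).length) := by
          rw [← hl, List.drop_drop]
        have hne := pvGo_ne_nil (c :: rest) fuel (List.drop (c :: rest).length (ch :: l')) []
        rw [List.dropLast_append_of_ne_nil hne]
        simp only [List.reverse_cons, List.reverse_nil, List.nil_append, List.singleton_append]
        rw [pvSplitFoldB]
        have hcl : cur.reverse.length = cur.length := List.length_reverse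
        rw [hcl, hdd]
        have ih' := ih [] (pos + cur.length + (c :: rest).length)
          (res ++ [(((pos + cur.length : Nat) : Int), ((pos + cur.length + (c :: rest).length : Nat) : Int))])
          (by simp only [List.length_cons, List.length_nil] at hlen ⊢; omega)
          (by simp only [List.length_cons, List.length_nil] at hlen ⊢; omega)
        simp only [List.length_nil, Nat.add_zero] at ih'
        rw [pvSpecScan, dif_pos (by simp only [List.length_cons] at hlen ⊢; omega), if_pos hpre]
        rw [ih']
        simp only [List.append_assoc, List.singleton_append]
        congr 2
      · simp only [hp, Bool.false_eq_true, if_false]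
        have hnp : ¬ (c :: rest) <+: t.drop (pos + cur.length) := by
          rw [hl]; exact fun hc => hp (List.isPrefixOf_iff_prefix.mpr hc)
        have hlt : pos + cur.length < t.length := by
          by_contra hc
          rw [List.drop_eq_nil_of_le (by omega)] at hl
          simp at hl
        have hl' : l' = t.drop (pos + (ch :: cur).length) := by
          have : (t.drop (pos + cur.length)).tail = t.drop (pos + cur.length + 1) := by
            rw [List.tail_drop]
          rw [hl] at this
          simp at this
          exact this
        rw [hl']
        have ih' := ih (ch :: cur) pos res
          (by simp only [List.length_cons]; omega) (by simp only [List.length_cons]; omega)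
        rw [ih', pvSpecScan_step t c rest _ hnp]
        congr 2

lemma pvFindLoopA_eq (t : List Char) (c : Char) (rest : List Char) :
    ∀ fuel pos res, pos ≤ t.length → t.length - pos < fuel →
      pvFindLoopA t (c :: rest) res pos fuel = res ++ pvSpecScan t c rest pos := by
  intro fuel
  induction fuel with
  | zero => intro pos res hle h; omega
  | succ fuel ih =>
    intro pos res hle h
    rw [pvFindLoopA]
    by_cases hc : pos < t.length
    · rw [if_pos hc]
      by_cases hf : PySem.Chars.findFrom t (c :: rest) (pos : Int) none = -1
      · rw [if_pos hf]
        have hni : ¬ (c :: rest) <:+: t.drop pos :=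
          (PySem.Chars.findFrom_natCast_eq_neg_one_iff t (c :: rest) pos hle).mp hf
        rw [pvSpecScan_nil t c rest pos (fun i hi hpre => by
          refine hni (hpre.isInfix.trans ?_)
          have : t.drop i = (t.drop pos).drop (i - pos) := by
            rw [List.drop_drop]; congr 1; omega
          rw [this]
          exact (List.drop_suffix _ _).isInfix)]
        simp
      · rw [if_neg hf]
        obtain ⟨hge, hpre, hmin⟩ := PySem.Chars.findFrom_natCast_spec t (c :: rest) pos hle hf
        set f := PySem.Chars.findFrom t (c :: rest) (pos : Int) none with hfdef
        have hf0 : (0 : Int) ≤ f := le_trans (by positivity) hge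
        have hfn : f = ((f.toNat : Nat) : Int) := (Int.toNat_of_nonneg hf0).symm
        have hlen : (c :: rest).length ≤ (t.drop f.toNat).length := hpre.length_le
        rw [List.length_drop] at hlen
        rw [pvSpecScan_skip t c rest (f.toNat - pos) pos f.toNat rfl (by omega) hpre
          (fun i h1 h2 => hmin i (by exact_mod_cast by omega) (by omega))]
        rw [ih (f.toNat + (c :: rest).length) _ (by simp at hlen ⊢; omega)
          (by simp at hlen ⊢; omega)]
        rw [hfn]
        simp
    · rw [if_neg hc]
      rw [pvSpecScan, dif_neg (by simp; omega)]
      simp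

-- ===== VERDICT (by name: the statement is the Claim_ definition above) =====
theorem get_matched_positions_spec : Claim_equal_get_matched_positions := by
  intro text keywords _
  unfold Spec_get_matched_positions get_matched_positions get_matched_positions_alt
  have hfun : ∀ (res : List (Int × Int)) (kw : String),
      (if kw.toList.length ≠ 0 then
        pvFindLoopA text.toList kw.toList res 0 (text.toList.length + 1) else res) =
      (if kw.toList.length ≠ 0 then
        pvSplitFoldB kw.toList.length
          (PySem.List.slice (PySem.Chars.splitOn text.toList kw.toList) none (some (-1))) res 0 else res) := by
    intro res kw
    cases hkw : kw.toList with
    | nil => simp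
    | cons c rest =>
      rw [if_pos (by simp), if_pos (by simp)]
      rw [pvFindLoopA_eq text.toList c rest _ 0 res (by omega) (by omega)]
      rw [PySem.List.slice_to_neg_one, PySem.Chars.splitOn.eq_def]
      have := pvGo_fold text.toList c rest (text.toList.length + 1) [] 0 res (by simp) (by simp)
      simp only [List.length_nil, Nat.add_zero, List.drop_zero] at this
      rw [this]
  suffices h : ∀ (l : List String) (acc : List (Int × Int)),
      l.foldl (fun res kw => if kw.toList.length ≠ 0 then
        pvFindLoopA text.toList kw.toList res 0 (text.toList.length + 1) else res) acc =
      l.foldl (fun res kw => if kw.toList.length ≠ 0 then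
        pvSplitFoldB kw.toList.length
          (PySem.List.slice (PySem.Chars.splitOn text.toList kw.toList) none (some (-1))) res 0 else res) acc from h keywords []
  intro l
  induction l with
  | nil => intro acc; rfl
  | cons k ks ih => intro acc; simp only [List.foldl_cons]; rw [hfun]; exact ih _
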